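-- pv_equiv track=rewrite | github.com/NivKonst/Actively-Secure-Vector-OLE | Vector_OLE.py | get_non_zero_indices_of_L
-- ===== SOURCE A (Python) =====
-- import queue
--
-- def get_non_zero_indices_of_L(LU_matrix,sparse_matrix_row,LU_row_index):
--     row_len=len(sparse_matrix_row);
--     if LU_row_index<=0 or row_len==0:
--         return None;
--     q=queue.Queue();
--     fill=[False]*LU_row_index;
--     fill_counter=0;
--     first_fill=LU_row_index;
--     last_fill=0;
--     for j in sparse_matrix_row:
--         if j>=LU_row_index:
--             break;
--         elif not fill[j]:
--             fill[j]=True;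
--             fill_counter+=1;
--             if fill_counter==1:
--                 first_fill=j;
--             last_fill=j;
--             q.put(j);
--     if fill_counter==LU_row_index:
--         return (fill,first_fill,LU_row_index);
--     while not q.empty():
--         i=q.get();
--         for j in range(i,LU_row_index):
--             if LU_matrix[i][j]!=0 and not fill[j]:
--                 fill[j]=True;
--                 fill_counter+=1;
--                 #if fill_counter==1:
--                 #    first_fill=j;
--                 if fill_counter==LU_row_index:
--                     return (fill,first_fill,LU_row_index);
--                 if last_fill<j:
--                     last_fill=j;
--                 q.put(j);
--     return (fill,first_fill,last_fill+1);
-- ===== SOURCE B (Python) =====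
-- def get_non_zero_indices_of_L(LU_matrix, sparse_matrix_row, LU_row_index):
--     row_len = len(sparse_matrix_row)
--     if LU_row_index <= 0 or row_len == 0:
--         return None
--     fill = [False] * LU_row_index
--     fill_counter = 0
--     first_fill = LU_row_index
--     last_fill = 0
--     for j in sparse_matrix_row:
--         if j >= LU_row_index:
--             break
--         elif not fill[j]:
--             fill[j] = True
--             fill_counter += 1
--             if fill_counter == 1:
--                 first_fill = j
--             last_fill = j
--     if fill_counter == LU_row_index:
--         return (fill, first_fill, LU_row_index)
--     # every edge i -> j has j >= i, so one ascending sweep reaches the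
--     # whole closure: no queue/worklist needed
--     for i in range(LU_row_index):
--         if fill[i]:
--             for j in range(i, LU_row_index):
--                 if LU_matrix[i][j] != 0 and not fill[j]:
--                     fill[j] = True
--                     fill_counter += 1
--                     if last_fill < j:
--                         last_fill = j
--     if fill_counter == LU_row_index:
--         return (fill, first_fill, LU_row_index)
--     return (fill, first_fill, last_fill + 1)
-- ===== Notes on version B (the rewrite author's own statement) =====
-- stated objective: simpler
-- what changed: Replaces the queue-driven BFS worklist with a single ascending left-to-right sweep over the rows (correct because every edge of the fill graph goes forward: row i only touches columns j>=i), keeping the seeding loop and its first_fill/last_fill bookkeeping unchanged.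
-- outside the precondition, e.g. on get_non_zero_indices_of_L([[1, 1], [1, 1]], [-1], 2): A returns ([True, True], -1, 2), B returns ([False, True], -1, 0); on get_non_zero_indices_of_L([[0, 1]], [0], 2): A returns ([True, True], 0, 2), B raises IndexError
import Mathlib
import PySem

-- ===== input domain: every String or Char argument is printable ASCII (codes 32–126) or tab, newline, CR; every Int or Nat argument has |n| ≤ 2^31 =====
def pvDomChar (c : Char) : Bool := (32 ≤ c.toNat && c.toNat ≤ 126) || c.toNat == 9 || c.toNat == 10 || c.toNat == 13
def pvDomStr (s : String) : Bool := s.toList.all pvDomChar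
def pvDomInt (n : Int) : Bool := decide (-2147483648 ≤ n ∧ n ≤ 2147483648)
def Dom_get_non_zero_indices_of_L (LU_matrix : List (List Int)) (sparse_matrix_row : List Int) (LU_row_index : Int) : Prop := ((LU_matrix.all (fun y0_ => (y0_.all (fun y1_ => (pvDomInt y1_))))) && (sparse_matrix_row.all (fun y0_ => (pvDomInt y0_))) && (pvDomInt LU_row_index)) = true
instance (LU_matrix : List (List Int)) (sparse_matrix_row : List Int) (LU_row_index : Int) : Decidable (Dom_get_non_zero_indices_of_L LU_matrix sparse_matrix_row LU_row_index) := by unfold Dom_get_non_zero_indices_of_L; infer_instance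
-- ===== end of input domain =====

-- B replaces A's queue-driven BFS with a single ascending sweep (every edge goes forward);
-- the equivalence below is about the RETURN value (the Python A mutates no argument).

-- ===== PORT A =====
-- seeding loop of A ('for j in sparse_matrix_row: ...', with the break)
def pvSeedA (n : Int) : List Int → List Bool → Int → Int → Int → List Int → List Bool × Int × Int × Int × List Int
  | [], fill, c, first, last, q => (fill, c, first, last, q)
  | j :: js, fill, c, first, last, q =>
    if n ≤ j then (fill, c, first, last, q)
    else if PySem.List.pyGetD fill j false = false then
      pvSeedA n js (PySem.List.pySetD fill j true) (c + 1) (if c + 1 = 1 then j else first) j (q ++ [j])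
    else pvSeedA n js fill c first last q

-- A's inner 'for j in range(i, LU_row_index)' loop; Sum.inl = the early 'return', Sum.inr = fall through
def pvInnerA (LU : List (List Int)) (n first i : Int) : List Int → List Bool → Int → Int → List Int → Option ((List Bool × Int × Int) ⊕ (List Bool × Int × Int × List Int))
  | [], fill, c, last, q => some (Sum.inr (fill, c, last, q))
  | j :: js, fill, c, last, q =>
    match PySem.List.pyGet? fill j with
    | none => none
    | some fj =>
      if PySem.List.pyGetD (PySem.List.pyGetD LU i []) j 0 ≠ 0 ∧ fj = false then
        match PySem.List.pySet? fill j true with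
        | none => none
        | some fill' =>
          if c + 1 = n then some (Sum.inl (fill', first, n))
          else pvInnerA LU n first i js fill' (c + 1) (if last < j then j else last) (q ++ [j])
      else pvInnerA LU n first i js fill c last q

-- lemmas the port itself needs (for pvBFSA's termination)
theorem pv_get_set {xs : List Bool} {i : Int} {b v : Bool} {ys : List Bool}
    (hg : PySem.List.pyGet? xs i = some b) (hs : PySem.List.pySet? xs i v = some ys) :
    ∃ m : Nat, m < xs.length ∧ xs.getD m false = b ∧ ys = xs.set m v := by
  unfold PySem.List.pyGet? at hg
  unfold PySem.List.pySet? at hs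
  unfold PySem.List.pyIdx? at hg hs
  split_ifs at hg hs with h0 h1 h2
  · refine ⟨i.toNat, by omega, ?_, ?_⟩
    · rw [List.getD_eq_getElem?_getD]
      have hg' : xs[i.toNat]? = some b := by simpa using hg
      rw [hg']; rfl
    · have hs' : xs.set i.toNat v = ys := by simpa using hs
      exact hs'.symm
  · simp at hg
  · refine ⟨xs.length - (-i).toNat, by omega, ?_, ?_⟩
    · rw [List.getD_eq_getElem?_getD]
      have hg' : xs[xs.length - (-i).toNat]? = some b := by simpa using hg
      rw [hg']; rfl
    · have hs' : xs.set (xs.length - (-i).toNat) v = ys := by simpa using hs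
      exact hs'.symm
  · simp at hg

theorem pv_count_set {xs : List Bool} {m : Nat} (h : m < xs.length)
    (hf : xs.getD m false = false) : (xs.set m true).count true = xs.count true + 1 := by
  induction xs generalizing m with
  | nil => simp at h
  | cons a t ih =>
    cases m with
    | zero =>
      simp only [List.getD_cons_zero] at hf
      subst hf
      simp
    | succ m =>
      simp only [List.getD_cons_succ] at hf
      have h' : m < t.length := by simpa using h
      cases a <;> simp [ih h' hf]

theorem pvInnerA_measure (LU : List (List Int)) (n first i : Int) :
    ∀ (js : List Int) (fill : List Bool) (c last : Int) (q : List Int)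
      (F : List Bool) (c' last' : Int) (q' : List Int),
      pvInnerA LU n first i js fill c last q = some (Sum.inr (F, c', last', q')) →
      F.length = fill.length ∧ fill.count true ≤ F.count true ∧
      q'.length + fill.count true = q.length + F.count true ∧ F.count true ≤ F.length := by
  intro js
  induction js with
  | nil =>
    intro fill c last q F c' last' q' hEq
    simp only [pvInnerA, Option.some.injEq, Sum.inr.injEq, Prod.mk.injEq] at hEq
    obtain ⟨rfl, rfl, rfl, rfl⟩ := hEq
    exact ⟨rfl, le_refl _, rfl, List.count_le_length⟩
  | cons j t ih =>
    intro fill c last q F c' last' q' hEq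
    simp only [pvInnerA] at hEq
    cases hg : PySem.List.pyGet? fill j with
    | none => rw [hg] at hEq; simp at hEq
    | some fj =>
      rw [hg] at hEq
      dsimp only at hEq
      by_cases hcond : PySem.List.pyGetD (PySem.List.pyGetD LU i []) j 0 ≠ 0 ∧ fj = false
      · rw [if_pos hcond] at hEq
        cases hs : PySem.List.pySet? fill j true with
        | none => rw [hs] at hEq; simp at hEq
        | some fill1 =>
          rw [hs] at hEq
          dsimp only at hEq
          by_cases hcn : c + 1 = n
          · rw [if_pos hcn] at hEq; simp at hEq
          · rw [if_neg hcn] at hEq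
            obtain ⟨m, hmlen, hgd, hset⟩ := pv_get_set hg hs
            have hcnt : fill1.count true = fill.count true + 1 := by
              rw [hset]; exact pv_count_set hmlen (hgd.trans hcond.2)
            have hlen1 : fill1.length = fill.length := by rw [hset]; simp
            obtain ⟨e1, e2, e3, e4⟩ := ih fill1 (c + 1) _ (q ++ [j]) F c' last' q' hEq
            refine ⟨e1.trans hlen1, by omega, ?_, e4⟩
            simp only [List.length_append, List.length_cons, List.length_nil] at e3
            omega
      · rw [if_neg hcond] at hEq
        exact ih fill c last q F c' last' q' hEq

-- A's 'while not q.empty()' loop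
def pvBFSA (LU : List (List Int)) (n first : Int) : List Bool → Int → Int → List Int → Option (List Bool × Int × Int)
  | fill, _, last, [] => some (fill, first, last + 1)
  | fill, c, last, i :: q' =>
    match h : pvInnerA LU n first i (PySem.List.pyRange i n) fill c last q' with
    | none => none
    | some (Sum.inl r) => some r
    | some (Sum.inr (F, c', l', q'')) => pvBFSA LU n first F c' l' q''
termination_by fill _ last q => ((fill.length + 1) - fill.count true) * (fill.length + 2) + q.length
decreasing_by
  obtain ⟨hlen, hle, hbal, hcl⟩ := pvInnerA_measure LU n first i _ fill c last q' F c' l' q'' h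
  have h2 : F.count true - fill.count true ≤ (F.count true - fill.count true) * (fill.length + 2) :=
    Nat.le_mul_of_pos_right _ (by omega)
  have h1 : ((fill.length + 1) - fill.count true) * (fill.length + 2)
      = ((F.length + 1) - F.count true) * (fill.length + 2) + (F.count true - fill.count true) * (fill.length + 2) := by
    rw [← Nat.add_mul]; congr 1; omega
  have hq : (i :: q').length = q'.length + 1 := rfl
  rw [hlen] at *
  omega

def get_non_zero_indices_of_L (LU_matrix : List (List Int)) (sparse_matrix_row : List Int) (LU_row_index : Int) : Option (List Bool × Int × Int) :=
  if LU_row_index ≤ 0 ∨ sparse_matrix_row.length = 0 then none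
  else
    match pvSeedA LU_row_index sparse_matrix_row (List.replicate LU_row_index.toNat false) 0 LU_row_index 0 [] with
    | (fill, c, first, last, q) =>
      if c = LU_row_index then some (fill, first, LU_row_index)
      else pvBFSA LU_matrix LU_row_index first fill c last q

-- ===== PORT B =====
-- the same seeding loop (B keeps it verbatim, minus the q.put)
def pvSeedB (n : Int) : List Int → List Bool → Int → Int → Int → List Bool × Int × Int × Int
  | [], fill, c, first, last => (fill, c, first, last)
  | j :: js, fill, c, first, last =>
    if n ≤ j then (fill, c, first, last)
    else if PySem.List.pyGetD fill j false = false then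
      pvSeedB n js (PySem.List.pySetD fill j true) (c + 1) (if c + 1 = 1 then j else first) j
    else pvSeedB n js fill c first last

-- B's inner 'for j in range(i, LU_row_index)'
def pvInnerB (LU : List (List Int)) (i : Int) : List Int → List Bool → Int → Int → List Bool × Int × Int
  | [], fill, c, last => (fill, c, last)
  | j :: js, fill, c, last =>
    if PySem.List.pyGetD (PySem.List.pyGetD LU i []) j 0 ≠ 0 ∧ PySem.List.pyGetD fill j false = false then
      pvInnerB LU i js (PySem.List.pySetD fill j true) (c + 1) (if last < j then j else last)
    else pvInnerB LU i js fill c last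

-- B's single ascending sweep 'for i in range(LU_row_index)'
def pvSweepB (LU : List (List Int)) (n : Int) : List Int → List Bool → Int → Int → List Bool × Int × Int
  | [], fill, c, last => (fill, c, last)
  | i :: is, fill, c, last =>
    if PySem.List.pyGetD fill i false = true then
      match pvInnerB LU i (PySem.List.pyRange i n) fill c last with
      | (F, c', l') => pvSweepB LU n is F c' l'
    else pvSweepB LU n is fill c last

def get_non_zero_indices_of_L_alt (LU_matrix : List (List Int)) (sparse_matrix_row : List Int) (LU_row_index : Int) : Option (List Bool × Int × Int) :=
  if LU_row_index ≤ 0 ∨ sparse_matrix_row.length = 0 then none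
  else
    match pvSeedB LU_row_index sparse_matrix_row (List.replicate LU_row_index.toNat false) 0 LU_row_index 0 with
    | (fill, c, first, last) =>
      if c = LU_row_index then some (fill, first, LU_row_index)
      else
        match pvSweepB LU_matrix LU_row_index (PySem.List.pyRange 0 LU_row_index) fill c last with
        | (F, c', l') =>
          if c' = LU_row_index then some (F, first, LU_row_index)
          else some (F, first, l' + 1)

-- ===== PRECONDITION & SPEC =====
-- Pre_ excludes (a) negative column indices in sparse_matrix_row — indices of a sparse row are
-- naturally nonnegative, and A's behaviour on them is accidental negative-index wraparound — and
-- (b) matrices whose first LU_row_index rows are shorter than LU_row_index (or fewer rows than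
-- LU_row_index), where A raises IndexError or returns only by accident of which rows it visits.
def Pre_get_non_zero_indices_of_L (LU_matrix : List (List Int)) (sparse_matrix_row : List Int) (LU_row_index : Int) : Prop :=
  LU_row_index ≤ 0 ∨ sparse_matrix_row = [] ∨
    ((∀ j ∈ sparse_matrix_row, 0 ≤ j) ∧ LU_row_index ≤ (LU_matrix.length : Int) ∧
      ∀ r ∈ LU_matrix.take LU_row_index.toNat, LU_row_index ≤ (r.length : Int))
instance (LU_matrix : List (List Int)) (sparse_matrix_row : List Int) (LU_row_index : Int) : Decidable (Pre_get_non_zero_indices_of_L LU_matrix sparse_matrix_row LU_row_index) := by unfold Pre_get_non_zero_indices_of_L; infer_instance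

def pvWitness_get_non_zero_indices_of_L : List (List Int) × List Int × Int := ([[1, 0], [0, 1]], [0], 2)

def Spec_get_non_zero_indices_of_L (LU_matrix : List (List Int)) (sparse_matrix_row : List Int) (LU_row_index : Int) (out : Option (List Bool × Int × Int)) : Prop := out = get_non_zero_indices_of_L_alt LU_matrix sparse_matrix_row LU_row_index
instance (LU_matrix : List (List Int)) (sparse_matrix_row : List Int) (LU_row_index : Int) (out : Option (List Bool × Int × Int)) : Decidable (Spec_get_non_zero_indices_of_L LU_matrix sparse_matrix_row LU_row_index out) := by unfold Spec_get_non_zero_indices_of_L; infer_instance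

-- ===== CLAIM (what is proved, stated in full; the proofs are below) =====
def Claim_equal_get_non_zero_indices_of_L : Prop := ∀ (LU_matrix : List (List Int)) (sparse_matrix_row : List Int) (LU_row_index : Int), Dom_get_non_zero_indices_of_L LU_matrix sparse_matrix_row LU_row_index → Pre_get_non_zero_indices_of_L LU_matrix sparse_matrix_row LU_row_index → Spec_get_non_zero_indices_of_L LU_matrix sparse_matrix_row LU_row_index (get_non_zero_indices_of_L LU_matrix sparse_matrix_row LU_row_index)

-- ===== LEMMAS AND PROOFS =====

-- the value LU_matrix[i][j] both programs test
def pvVal (LU : List (List Int)) (i j : Nat) : Int := (LU.getD i []).getD j 0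

-- transitive fill pattern: least superset of the seeded positions closed under the forward edges
inductive pvReach (LU : List (List Int)) (N : Nat) (base : List Bool) : Nat → Prop
  | base (j : Nat) : base.getD j false = true → pvReach LU N base j
  | step (i j : Nat) : pvReach LU N base i → i ≤ j → j < N → pvVal LU i j ≠ 0 → pvReach LU N base j

-- positions filled after seeding-time but not seeded (for the last_fill bookkeeping)
def pvFillSet (N : Nat) (base fill : List Bool) : Finset Nat :=
  (Finset.range N).filter (fun j => fill.getD j false = true ∧ base.getD j false = false)

def pvLastOf (N : Nat) (base : List Bool) (l0 : Int) (fill : List Bool) : Int :=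
  Finset.fold max l0 (fun (j : Nat) => (j : Int)) (pvFillSet N base fill)

theorem pv_getD_true_lt {xs : List Bool} {m : Nat} (h : xs.getD m false = true) : m < xs.length := by
  by_contra hc
  rw [List.getD_eq_default _ _ (by omega)] at h
  exact Bool.false_ne_true h

theorem pv_getD_set {xs : List Bool} {m : Nat} (h : m < xs.length) (v : Bool) (k : Nat) (d : Bool) :
    (xs.set m v).getD k d = if k = m then v else xs.getD k d := by
  rcases eq_or_ne k m with rfl | hk
  · rw [if_pos rfl, List.getD_eq_getElem?_getD, List.getElem?_set, if_pos rfl, if_pos h]; rfl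
  · rw [if_neg hk, List.getD_eq_getElem?_getD, List.getElem?_set,
      if_neg (fun hh => hk hh.symm), ← List.getD_eq_getElem?_getD]

theorem pv_reach_lt {LU : List (List Int)} {N : Nat} {base : List Bool} (hb : base.length = N)
    {m : Nat} (h : pvReach LU N base m) : m < N := by
  induction h with
  | base j hj => exact hb ▸ pv_getD_true_lt hj
  | step i j _ _ hj _ => exact hj

theorem pv_reach_sub {LU : List (List Int)} {N : Nat} {base F : List Bool}
    (hbF : ∀ m : Nat, base.getD m false = true → F.getD m false = true)
    (hcl : ∀ m : Nat, F.getD m false = true → ∀ j : Nat, m ≤ j → j < N → pvVal LU m j ≠ 0 → F.getD j false = true)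
    {m : Nat} (h : pvReach LU N base m) : F.getD m false = true := by
  induction h with
  | base j hj => exact hbF j hj
  | step i j _ hij hj hv ih => exact hcl i ih j hij hj hv

theorem pv_lastOf_base (N : Nat) (base : List Bool) (l0 : Int) : pvLastOf N base l0 base = l0 := by
  unfold pvLastOf
  have h : pvFillSet N base base = ∅ := by
    ext x
    simp only [pvFillSet, Finset.mem_filter, Finset.notMem_empty, iff_false, not_and]
    intro _ h1 h2
    rw [h1] at h2
    exact absurd h2 (by simp)
  rw [h, Finset.fold_empty]

theorem pv_lastOf_set {N : Nat} {base fill : List Bool} {l0 : Int} {m : Nat}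
    (hm : m < N) (hlen : m < fill.length)
    (hfill : fill.getD m false = false) (hbase : base.getD m false = false) :
    pvLastOf N base l0 (fill.set m true) = max (pvLastOf N base l0 fill) (m : Int) := by
  have hnm : m ∉ pvFillSet N base fill := by
    simp only [pvFillSet, Finset.mem_filter, Finset.mem_range]
    rintro ⟨-, h1, -⟩
    rw [hfill] at h1
    exact absurd h1 (by simp)
  have hset : pvFillSet N base (fill.set m true) = insert m (pvFillSet N base fill) := by
    ext x
    simp only [pvFillSet, Finset.mem_filter, Finset.mem_insert, Finset.mem_range]
    rw [pv_getD_set hlen]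
    rcases eq_or_ne x m with rfl | hx
    · constructor
      · intro _
        exact Or.inl rfl
      · intro _
        exact ⟨hm, by simp, hbase⟩
    · constructor
      · rintro ⟨h1, h2, h3⟩
        rw [if_neg hx] at h2
        exact Or.inr ⟨h1, h2, h3⟩
      · rintro (h | ⟨h1, h2, h3⟩)
        · exact absurd h hx
        · exact ⟨h1, by rw [if_neg hx]; exact h2, h3⟩
  unfold pvLastOf
  rw [hset, Finset.fold_insert hnm]
  exact max_comm _ _

-- seeding-loop characterisation
theorem pvSeedA_spec (N : Nat) :
    ∀ (js : List Int) (fill : List Bool) (c first last : Int) (q : List Int),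
      (∀ j ∈ js, 0 ≤ j) →
      fill.length = N →
      c = (fill.count true : Int) →
      (∀ x ∈ q, ∃ m : Nat, x = (m : Int) ∧ m < N ∧ fill.getD m false = true) →
      (∀ m : Nat, fill.getD m false = true → (m : Int) ∈ q) →
      ∃ F c' first' last' q',
        pvSeedA (N : Int) js fill c first last q = (F, c', first', last', q') ∧
        F.length = N ∧ c' = (F.count true : Int) ∧
        (∀ x ∈ q', ∃ m : Nat, x = (m : Int) ∧ m < N ∧ F.getD m false = true) ∧
        (∀ m : Nat, F.getD m false = true → (m : Int) ∈ q') := by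
  intro js
  induction js with
  | nil =>
    intro fill c first last q _ hlen hc hq hmem
    exact ⟨fill, c, first, last, q, rfl, hlen, hc, hq, hmem⟩
  | cons j t ih =>
    intro fill c first last q hnn hlen hc hq hmem
    have hj0 : 0 ≤ j := hnn j (by simp)
    have hnn' : ∀ x ∈ t, 0 ≤ x := fun x hx => hnn x (by simp [hx])
    simp only [pvSeedA]
    by_cases hbr : (N : Int) ≤ j
    · rw [if_pos hbr]
      exact ⟨fill, c, first, last, q, rfl, hlen, hc, hq, hmem⟩
    · rw [if_neg hbr]
      obtain ⟨m, rfl⟩ : ∃ m : Nat, j = (m : Int) := ⟨j.toNat, by omega⟩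
      have hmN : m < N := by omega
      have hmlen : m < fill.length := by omega
      rw [PySem.List.pyGetD_natCast, PySem.List.pySetD_natCast]
      by_cases hf : fill.getD m false = false
      · rw [if_pos hf]
        refine ih _ _ _ _ _ hnn' (by simpa using hlen) ?_ ?_ ?_
        · rw [pv_count_set hmlen hf]; push_cast; omega
        · intro x hx
          rcases List.mem_append.mp hx with hx | hx
          · obtain ⟨m', hxm, hm'N, hfm'⟩ := hq x hx
            refine ⟨m', hxm, hm'N, ?_⟩
            rw [pv_getD_set hmlen]
            by_cases hmm : m' = m
            · rw [if_pos hmm]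
            · rw [if_neg hmm]
              exact hfm'
          · rw [List.mem_singleton] at hx
            subst hx
            exact ⟨m, rfl, hmN, by rw [pv_getD_set hmlen, if_pos rfl]⟩
        · intro m' hm'
          rw [pv_getD_set hmlen] at hm'
          by_cases hmm : m' = m
          · subst hmm
            exact List.mem_append.mpr (Or.inr (by simp))
          · rw [if_neg hmm] at hm'
            exact List.mem_append.mpr (Or.inl (hmem m' hm'))
      · have hft : fill.getD m false = true := by
          cases h2 : fill.getD m false
          · exact absurd h2 hf
          · rfl
        rw [if_neg (by rw [hft]; simp)]
        exact ih fill c first last q hnn' hlen hc hq hmem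

-- B's seeding loop is A's, minus the queue
theorem pvSeedB_eq (n : Int) :
    ∀ (js : List Int) (fill : List Bool) (c first last : Int) (q : List Int),
      pvSeedB n js fill c first last =
        ((pvSeedA n js fill c first last q).1, (pvSeedA n js fill c first last q).2.1,
         (pvSeedA n js fill c first last q).2.2.1, (pvSeedA n js fill c first last q).2.2.2.1) := by
  intro js
  induction js with
  | nil =>
    intro fill c first last q
    rfl
  | cons j t ih =>
    intro fill c first last q
    simp only [pvSeedA, pvSeedB]
    split_ifs with h1 h2 h3
    · rfl
    · exact ih (PySem.List.pySetD fill j true) (c + 1) j j (q ++ [j])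
    · exact ih (PySem.List.pySetD fill j true) (c + 1) first j (q ++ [j])
    · exact ih fill c first last q

-- B's inner loop characterisation
theorem pvInnerB_spec (LU : List (List Int)) (N : Nat) (base : List Bool) (l0 : Int)
    (iN : Nat) (hReachI : pvReach LU N base iN) :
    ∀ (js : List Int) (fill : List Bool) (c last : Int),
      (∀ j ∈ js, (iN : Int) ≤ j ∧ 0 ≤ j ∧ j < (N : Int)) →
      fill.length = N →
      c = (fill.count true : Int) →
      last = pvLastOf N base l0 fill →
      (∀ m : Nat, base.getD m false = true → fill.getD m false = true) →
      (∀ m : Nat, fill.getD m false = true → pvReach LU N base m) →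
      ∃ F c' last',
        pvInnerB LU (iN : Int) js fill c last = (F, c', last') ∧
        F.length = N ∧ c' = (F.count true : Int) ∧ last' = pvLastOf N base l0 F ∧
        (∀ m : Nat, fill.getD m false = true → F.getD m false = true) ∧
        (∀ m : Nat, F.getD m false = true → pvReach LU N base m) ∧
        (∀ m : Nat, F.getD m false = true → fill.getD m false = true ∨ (m : Int) ∈ js) ∧
        (∀ j ∈ js, pvVal LU iN j.toNat ≠ 0 → F.getD j.toNat false = true) := by
  intro js
  induction js with
  | nil =>
    intro fill c last _ hlen hc hlast hbf hfr
    refine ⟨fill, c, last, rfl, hlen, hc, hlast, fun _ h => h, hfr, fun m h => Or.inl h, ?_⟩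
    intro j hj
    simp at hj
  | cons j t ih =>
    intro fill c last hb hlen hc hlast hbf hfr
    obtain ⟨hij, hj0, hjN⟩ := hb j (by simp)
    obtain ⟨m, rfl⟩ : ∃ m : Nat, j = (m : Int) := ⟨j.toNat, by omega⟩
    have hb' : ∀ x ∈ t, (iN : Int) ≤ x ∧ 0 ≤ x ∧ x < (N : Int) := fun x hx => hb x (by simp [hx])
    have him : iN ≤ m := by omega
    have hmN : m < N := by omega
    have hmlen : m < fill.length := by omega
    simp only [pvInnerB, PySem.List.pyGetD_natCast, PySem.List.pySetD_natCast]
    by_cases hcond : (LU.getD iN []).getD m 0 ≠ 0 ∧ fill.getD m false = false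
    · rw [if_pos hcond]
      have hbm : base.getD m false = false := by
        cases h2 : base.getD m false
        · rfl
        · rw [hbf m h2] at hcond
          exact absurd hcond.2 (by simp)
      have hlast' : (if last < (m : Int) then (m : Int) else last) = pvLastOf N base l0 (fill.set m true) := by
        rw [pv_lastOf_set hmN hmlen hcond.2 hbm, ← hlast]
        split_ifs with h <;> omega
      obtain ⟨F, c', l', hEq, hlen', hc', hl', hmono, hre, hold, hcov⟩ :=
        ih (fill.set m true) (c + 1) (if last < (m : Int) then (m : Int) else last) hb'
          (by simpa using hlen)
          (by rw [pv_count_set hmlen hcond.2]; push_cast; omega)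
          hlast'
          (fun m' h => by
            rw [pv_getD_set hmlen]
            by_cases hmm : m' = m
            · rw [if_pos hmm]
            · rw [if_neg hmm]
              exact hbf m' h)
          (fun m' h => by
            rw [pv_getD_set hmlen] at h
            by_cases hmm : m' = m
            · subst hmm
              exact pvReach.step iN m' hReachI him hmN hcond.1
            · rw [if_neg hmm] at h
              exact hfr m' h)
      refine ⟨F, c', l', hEq, hlen', hc', hl', ?_, hre, ?_, ?_⟩
      · intro m' h
        refine hmono m' ?_
        rw [pv_getD_set hmlen]
        by_cases hmm : m' = m
        · rw [if_pos hmm]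
        · rw [if_neg hmm]
          exact h
      · intro m' h
        rcases hold m' h with h1 | h1
        · rw [pv_getD_set hmlen] at h1
          by_cases hmm : m' = m
          · subst hmm
            exact Or.inr (by simp)
          · rw [if_neg hmm] at h1
            exact Or.inl h1
        · exact Or.inr (by simp [h1])
      · intro j' hj' hv
        rcases List.mem_cons.mp hj' with rfl | hj'
        · simp only [Int.toNat_natCast] at hv ⊢
          exact hmono m (by rw [pv_getD_set hmlen]; simp)
        · exact hcov j' hj' hv
    · rw [if_neg hcond]
      obtain ⟨F, c', l', hEq, hlen', hc', hl', hmono, hre, hold, hcov⟩ :=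
        ih fill c last hb' hlen hc hlast hbf hfr
      refine ⟨F, c', l', hEq, hlen', hc', hl', hmono, hre, ?_, ?_⟩
      · intro m' h
        rcases hold m' h with h1 | h1
        · exact Or.inl h1
        · exact Or.inr (by simp [h1])
      · intro j' hj' hv
        rcases List.mem_cons.mp hj' with rfl | hj'
        · simp only [Int.toNat_natCast] at hv ⊢
          have hfm : fill.getD m false = true := by
            cases h2 : fill.getD m false
            · exact absurd ⟨hv, h2⟩ hcond
            · rfl
          exact hmono m hfm
        · exact hcov j' hj' hv

-- B's sweep characterisation: at the end the fill pattern is closed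
theorem pvSweepB_spec (LU : List (List Int)) (N : Nat) (base : List Bool) (l0 : Int) :
    ∀ (k : Nat) (i0 : Int) (fill : List Bool) (c last : Int),
      i0 = (N : Int) - (k : Int) → k ≤ N →
      fill.length = N →
      c = (fill.count true : Int) →
      last = pvLastOf N base l0 fill →
      (∀ m : Nat, base.getD m false = true → fill.getD m false = true) →
      (∀ m : Nat, fill.getD m false = true → pvReach LU N base m) →
      (∀ m : Nat, fill.getD m false = true → i0 ≤ (m : Int) ∨
        (∀ j : Nat, m ≤ j → j < N → pvVal LU m j ≠ 0 → fill.getD j false = true)) →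
      ∃ F c' l',
        pvSweepB LU (N : Int) (PySem.List.pyRange i0 (N : Int)) fill c last = (F, c', l') ∧
        F.length = N ∧ c' = (F.count true : Int) ∧ l' = pvLastOf N base l0 F ∧
        (∀ m : Nat, fill.getD m false = true → F.getD m false = true) ∧
        (∀ m : Nat, F.getD m false = true → pvReach LU N base m) ∧
        (∀ m : Nat, F.getD m false = true → ∀ j : Nat, m ≤ j → j < N → pvVal LU m j ≠ 0 → F.getD j false = true) := by
  intro k
  induction k with
  | zero =>
    intro i0 fill c last hi0 _ hlen hc hlast hbf hfr hcl
    rw [PySem.List.pyRange_one_eq_nil (by omega)]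
    simp only [pvSweepB]
    refine ⟨fill, c, last, rfl, hlen, hc, hlast, fun _ h => h, hfr, ?_⟩
    intro m hm j hmj hjN hv
    rcases hcl m hm with hge | hclosed
    · exfalso
      have hmlt : m < N := by
        have := pv_getD_true_lt hm
        omega
      omega
    · exact hclosed j hmj hjN hv
  | succ k ih =>
    intro i0 fill c last hi0 hkN hlen hc hlast hbf hfr hcl
    obtain ⟨m0, rfl⟩ : ∃ m0 : Nat, i0 = (m0 : Int) := ⟨i0.toNat, by omega⟩
    have hm0N : m0 < N := by omega
    rw [PySem.List.pyRange_one_cons (by exact_mod_cast hm0N)]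
    simp only [pvSweepB, PySem.List.pyGetD_natCast]
    by_cases hfm : fill.getD m0 false = true
    · rw [if_pos hfm]
      obtain ⟨F, c', l', hEq, hlen', hc', hl', hmono, hre, hold, hcov⟩ :=
        pvInnerB_spec LU N base l0 m0 (hfr m0 hfm) (PySem.List.pyRange (m0 : Int) (N : Int)) fill c last
          (by
            intro x hx
            rw [PySem.List.mem_pyRange_one] at hx
            exact ⟨hx.1, by omega, hx.2⟩)
          hlen hc hlast hbf hfr
      rw [hEq]
      dsimp only
      have hclNew : ∀ m' : Nat, F.getD m' false = true → ((m0 : Int) + 1 ≤ (m' : Int) ∨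
          ∀ j : Nat, m' ≤ j → j < N → pvVal LU m' j ≠ 0 → F.getD j false = true) := by
        intro m' hFm'
        by_cases hmm : m' = m0
        · subst hmm
          right
          intro jj hjj hjjN hv
          have hjmem : ((jj : Nat) : Int) ∈ PySem.List.pyRange (m' : Int) (N : Int) := by
            rw [PySem.List.mem_pyRange_one]
            exact ⟨by omega, by omega⟩
          have hh := hcov (jj : Int) hjmem
          simp only [Int.toNat_natCast] at hh
          exact hh hv
        · rcases hold m' hFm' with hOld | hJs
          · rcases hcl m' hOld with hge | hclosed
            · left
              omega
            · right
              intro jj hjj hjjN hv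
              exact hmono jj (hclosed jj hjj hjjN hv)
          · rw [PySem.List.mem_pyRange_one] at hJs
            left
            omega
      obtain ⟨F1, c1, l1, hEq1, hlen1, hc1, hl1, hmono1, hre1, hcl1⟩ :=
        ih ((m0 : Int) + 1) F c' l' (by omega) (by omega) hlen' hc' hl'
          (fun m' hh => hmono m' (hbf m' hh)) hre hclNew
      exact ⟨F1, c1, l1, hEq1, hlen1, hc1, hl1, fun m' hh => hmono1 m' (hmono m' hh), hre1, hcl1⟩
    · rw [if_neg hfm]
      refine ih ((m0 : Int) + 1) fill c last (by omega) (by omega) hlen hc hlast hbf hfr ?_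
      intro m' hFm'
      by_cases hmm : m' = m0
      · subst hmm
        exact absurd hFm' hfm
      · rcases hcl m' hFm' with hge | hclosed
        · left
          omega
        · right
          exact hclosed

-- A's inner loop characterisation
theorem pvInnerA_spec (LU : List (List Int)) (N : Nat) (base : List Bool) (l0 first : Int)
    (iN : Nat) (hReachI : pvReach LU N base iN) :
    ∀ (js : List Int) (fill : List Bool) (c last : Int) (q : List Int),
      (∀ j ∈ js, (iN : Int) ≤ j ∧ 0 ≤ j ∧ j < (N : Int)) →
      fill.length = N →
      c = (fill.count true : Int) →
      fill.count true < N →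
      last = pvLastOf N base l0 fill →
      (∀ x ∈ q, ∃ m : Nat, x = (m : Int) ∧ m < N ∧ fill.getD m false = true) →
      (∀ m : Nat, base.getD m false = true → fill.getD m false = true) →
      (∀ m : Nat, fill.getD m false = true → pvReach LU N base m) →
      (∃ F, pvInnerA LU (N : Int) first (iN : Int) js fill c last q = some (Sum.inl (F, first, (N : Int))) ∧
        F.length = N ∧ F.count true = N ∧
        (∀ m : Nat, F.getD m false = true → pvReach LU N base m)) ∨
      (∃ F c' last' q',
        pvInnerA LU (N : Int) first (iN : Int) js fill c last q = some (Sum.inr (F, c', last', q')) ∧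
        F.length = N ∧ c' = (F.count true : Int) ∧ F.count true < N ∧
        last' = pvLastOf N base l0 F ∧
        q ⊆ q' ∧
        (∀ x ∈ q', ∃ m : Nat, x = (m : Int) ∧ m < N ∧ F.getD m false = true) ∧
        (∀ m : Nat, fill.getD m false = true → F.getD m false = true) ∧
        (∀ m : Nat, base.getD m false = true → F.getD m false = true) ∧
        (∀ m : Nat, F.getD m false = true → pvReach LU N base m) ∧
        (∀ j ∈ js, pvVal LU iN j.toNat ≠ 0 → F.getD j.toNat false = true) ∧
        (∀ m : Nat, F.getD m false = true → fill.getD m false = true ∨ (m : Int) ∈ q')) := by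
  intro js
  induction js with
  | nil =>
    intro fill c last q _ hlen hc hcN hlast hq hbf hfr
    right
    refine ⟨fill, c, last, q, rfl, hlen, hc, hcN, hlast, fun x hx => hx, hq, fun _ h => h, hbf, hfr, ?_, fun m h => Or.inl h⟩
    intro j hj
    simp at hj
  | cons j t ih =>
    intro fill c last q hb hlen hc hcN hlast hq hbf hfr
    obtain ⟨hij, hj0, hjN⟩ := hb j (by simp)
    obtain ⟨m, rfl⟩ : ∃ m : Nat, j = (m : Int) := ⟨j.toNat, by omega⟩
    have hb' : ∀ x ∈ t, (iN : Int) ≤ x ∧ 0 ≤ x ∧ x < (N : Int) := fun x hx => hb x (by simp [hx])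
    have him : iN ≤ m := by omega
    have hmN : m < N := by omega
    have hmlen : m < fill.length := by omega
    have hget : PySem.List.pyGet? fill (m : Int) = some (fill.getD m false) := by
      simp [PySem.List.pyGet?_natCast, List.getD_eq_getElem?_getD, List.getElem?_eq_getElem hmlen]
    have hset : PySem.List.pySet? fill (m : Int) true = some (fill.set m true) :=
      PySem.List.pySet?_natCast fill m true hmlen
    simp only [pvInnerA, hget, hset]
    simp only [PySem.List.pyGetD_natCast]
    by_cases hcond : (LU.getD iN []).getD m 0 ≠ 0 ∧ fill.getD m false = false
    · rw [if_pos hcond]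
      by_cases hcn : c + 1 = (N : Int)
      · rw [if_pos hcn]
        left
        refine ⟨fill.set m true, rfl, by simpa using hlen, ?_, ?_⟩
        · rw [pv_count_set hmlen hcond.2]
          omega
        · intro m' h
          rw [pv_getD_set hmlen] at h
          by_cases hmm : m' = m
          · subst hmm
            exact pvReach.step iN m' hReachI him hmN hcond.1
          · rw [if_neg hmm] at h
            exact hfr m' h
      · rw [if_neg hcn]
        have hbm : base.getD m false = false := by
          cases h2 : base.getD m false
          · rfl
          · rw [hbf m h2] at hcond
            exact absurd hcond.2 (by simp)
        have hcnt1 : (fill.set m true).count true = fill.count true + 1 := pv_count_set hmlen hcond.2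
        have hlast' : (if last < (m : Int) then (m : Int) else last) = pvLastOf N base l0 (fill.set m true) := by
          rw [pv_lastOf_set hmN hmlen hcond.2 hbm, ← hlast]
          split_ifs with h <;> omega
        have hcount' : (fill.set m true).count true < N := by
          have hle : (fill.set m true).count true ≤ N := by
            have h2 : (fill.set m true).length = N := by simpa using hlen
            exact h2 ▸ List.count_le_length
          have hne : (fill.set m true).count true ≠ N := by
            intro hh
            apply hcn
            rw [hc]
            rw [hcnt1] at hh
            omega
          omega
        rcases ih (fill.set m true) (c + 1) _ (q ++ [(m : Int)]) hb' (by simpa using hlen)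
            (by rw [hcnt1]; push_cast; omega) hcount' hlast'
            (by
              intro x hx
              rcases List.mem_append.mp hx with hx | hx
              · obtain ⟨m', hxm, hm'N, hfm'⟩ := hq x hx
                refine ⟨m', hxm, hm'N, ?_⟩
                rw [pv_getD_set hmlen]
                by_cases hmm : m' = m
                · rw [if_pos hmm]
                · rw [if_neg hmm]
                  exact hfm'
              · rw [List.mem_singleton] at hx
                subst hx
                exact ⟨m, rfl, hmN, by rw [pv_getD_set hmlen, if_pos rfl]⟩)
            (fun m' h => by
              rw [pv_getD_set hmlen]
              by_cases hmm : m' = m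
              · rw [if_pos hmm]
              · rw [if_neg hmm]
                exact hbf m' h)
            (fun m' h => by
              rw [pv_getD_set hmlen] at h
              by_cases hmm : m' = m
              · subst hmm
                exact pvReach.step iN m' hReachI him hmN hcond.1
              · rw [if_neg hmm] at h
                exact hfr m' h)
          with hL | hR
        · left
          exact hL
        · right
          obtain ⟨F, c', last', q', hEq, hlen', hc', hcN', hl', hsub, hq', hmono, hbF, hre, hcov, hold⟩ := hR
          refine ⟨F, c', last', q', hEq, hlen', hc', hcN', hl', ?_, hq', ?_, hbF, hre, ?_, ?_⟩
          · exact fun x hx => hsub (by simp [hx])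
          · intro m' h
            refine hmono m' ?_
            rw [pv_getD_set hmlen]
            by_cases hmm : m' = m
            · rw [if_pos hmm]
            · rw [if_neg hmm]
              exact h
          · intro j' hj' hv
            rcases List.mem_cons.mp hj' with rfl | hj'
            · simp only [Int.toNat_natCast] at hv ⊢
              exact hmono m (by rw [pv_getD_set hmlen]; simp)
            · exact hcov j' hj' hv
          · intro m' h
            rcases hold m' h with h1 | h1
            · rw [pv_getD_set hmlen] at h1
              by_cases hmm : m' = m
              · subst hmm
                exact Or.inr (hsub (by simp))
              · rw [if_neg hmm] at h1
                exact Or.inl h1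
            · exact Or.inr h1
    · rw [if_neg hcond]
      rcases ih fill c last q hb' hlen hc hcN hlast hq hbf hfr with hL | hR
      · left
        exact hL
      · right
        obtain ⟨F, c', last', q', hEq, hlen', hc', hcN', hl', hsub, hq', hmono, hbF, hre, hcov, hold⟩ := hR
        refine ⟨F, c', last', q', hEq, hlen', hc', hcN', hl', hsub, hq', hmono, hbF, hre, ?_, hold⟩
        intro j' hj' hv
        rcases List.mem_cons.mp hj' with rfl | hj'
        · simp only [Int.toNat_natCast] at hv ⊢
          have hfm : fill.getD m false = true := by
            cases h2 : fill.getD m false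
            · exact absurd ⟨hv, h2⟩ hcond
            · rfl
          exact hmono m hfm
        · exact hcov j' hj' hv

-- A's BFS loop characterisation
theorem pvBFSA_spec (LU : List (List Int)) (N : Nat) (base : List Bool) (l0 first : Int)
    (hbase : base.length = N) :
    ∀ (fill : List Bool) (c last : Int) (q : List Int),
      fill.length = N →
      c = (fill.count true : Int) →
      fill.count true < N →
      last = pvLastOf N base l0 fill →
      (∀ x ∈ q, ∃ m : Nat, x = (m : Int) ∧ m < N ∧ fill.getD m false = true) →
      (∀ m : Nat, base.getD m false = true → fill.getD m false = true) →
      (∀ m : Nat, fill.getD m false = true → pvReach LU N base m) →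
      (∀ m : Nat, m < N → fill.getD m false = true → (m : Int) ∈ q ∨
        (∀ j : Nat, m ≤ j → j < N → pvVal LU m j ≠ 0 → fill.getD j false = true)) →
      ∃ F, pvBFSA LU (N : Int) first fill c last q =
          some (F, first, if F.count true = N then (N : Int) else pvLastOf N base l0 F + 1) ∧
        F.length = N ∧ (∀ m : Nat, F.getD m false = true ↔ pvReach LU N base m) := by
  intro fill c last q
  induction fill, c, last, q using pvBFSA.induct LU (N : Int) first with
  | case1 fill c last =>
    intro hlen hc hcN hlast hq hbf hfr hcl
    refine ⟨fill, ?_, hlen, ?_⟩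
    · simp only [pvBFSA]
      rw [if_neg (by omega : ¬ List.count true fill = N), hlast]
    · intro m
      constructor
      · exact hfr m
      · intro h
        refine pv_reach_sub hbf ?_ h
        intro m' hm' j hmj hjN hv
        have hm'N : m' < N := by
          have := pv_getD_true_lt hm'
          omega
        rcases hcl m' hm'N hm' with hmem | hclosed
        · simp at hmem
        · exact hclosed j hmj hjN hv
  | case2 fill c last i q' h =>
    intro hlen hc hcN hlast hq hbf hfr hcl
    exfalso
    obtain ⟨iN, rfl, hiNlt, hifill⟩ := hq i (by simp)
    rcases pvInnerA_spec LU N base l0 first iN (hfr iN hifill) (PySem.List.pyRange (iN : Int) (N : Int)) fill c last q'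
        (by intro x hx; rw [PySem.List.mem_pyRange_one] at hx; exact ⟨hx.1, by omega, hx.2⟩)
        hlen hc hcN hlast (fun x hx => hq x (by simp [hx])) hbf hfr with
      ⟨F, hEq, -, -, -⟩ | ⟨F, c', l', q'', hEq, -, -, -, -, -, -, -, -, -, -, -⟩ <;>
      rw [h] at hEq <;> simp at hEq
  | case3 fill c last i q' r h =>
    intro hlen hc hcN hlast hq hbf hfr hcl
    obtain ⟨iN, rfl, hiNlt, hifill⟩ := hq i (by simp)
    rcases pvInnerA_spec LU N base l0 first iN (hfr iN hifill) (PySem.List.pyRange (iN : Int) (N : Int)) fill c last q'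
        (by intro x hx; rw [PySem.List.mem_pyRange_one] at hx; exact ⟨hx.1, by omega, hx.2⟩)
        hlen hc hcN hlast (fun x hx => hq x (by simp [hx])) hbf hfr with
      ⟨F, hEq, hFlen, hFcnt, hFre⟩ | ⟨F, c', l', q'', hEq, -, -, -, -, -, -, -, -, -, -, -⟩
    · rw [h] at hEq
      simp only [Option.some.injEq, Sum.inl.injEq] at hEq
      subst hEq
      refine ⟨F, ?_, hFlen, ?_⟩
      · simp only [pvBFSA]
        rw [h]
        rw [if_pos hFcnt]
      · intro m
        constructor
        · exact hFre m
        · intro hr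
          have hmN : m < N := pv_reach_lt hbase hr
          have hall : ∀ b ∈ F, true = b := List.count_eq_length.mp (by rw [hFcnt, hFlen])
          rw [List.getD_eq_getElem?_getD, List.getElem?_eq_getElem (by omega)]
          exact (hall _ (List.getElem_mem (by omega))).symm
    · rw [h] at hEq
      simp at hEq
  | case4 fill c last i q' F c' l' q'' h ih =>
    intro hlen hc hcN hlast hq hbf hfr hcl
    obtain ⟨iN, rfl, hiNlt, hifill⟩ := hq i (by simp)
    rcases pvInnerA_spec LU N base l0 first iN (hfr iN hifill) (PySem.List.pyRange (iN : Int) (N : Int)) fill c last q'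
        (by intro x hx; rw [PySem.List.mem_pyRange_one] at hx; exact ⟨hx.1, by omega, hx.2⟩)
        hlen hc hcN hlast (fun x hx => hq x (by simp [hx])) hbf hfr with
      ⟨F0, hEq, -, -, -⟩ | ⟨F0, c0, l0', q0, hEq, hlen0, hc0, hcN0, hl0, hsub0, hq0, hmono0, hbf0, hre0, hcov0, hold0⟩
    · rw [h] at hEq
      simp at hEq
    · rw [h] at hEq
      simp only [Option.some.injEq, Sum.inr.injEq, Prod.mk.injEq] at hEq
      obtain ⟨rfl, rfl, rfl, rfl⟩ := hEq
      have hclosedNew : ∀ m : Nat, m < N → F.getD m false = true → ((m : Int) ∈ q'' ∨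
          ∀ j : Nat, m ≤ j → j < N → pvVal LU m j ≠ 0 → F.getD j false = true) := by
        intro m hmN hFm
        rcases hold0 m hFm with hOld | hInQ
        · rcases hcl m hmN hOld with hmem | hclA
          · rcases List.mem_cons.mp hmem with hmi | hmq
            · right
              have hmiN : m = iN := by exact_mod_cast hmi
              subst hmiN
              intro j hmj hjN hv
              have hjmem : ((j : Nat) : Int) ∈ PySem.List.pyRange (m : Int) (N : Int) := by
                rw [PySem.List.mem_pyRange_one]
                exact ⟨by omega, by omega⟩
              have hh := hcov0 (j : Int) hjmem
              simp only [Int.toNat_natCast] at hh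
              exact hh hv
            · left
              exact hsub0 hmq
          · right
            intro j hmj hjN hv
            exact hmono0 j (hclA j hmj hjN hv)
        · left
          exact hInQ
      obtain ⟨FF, hF, hFlen, hFiff⟩ := ih hlen0 hc0 hcN0 hl0 hq0 hbf0 hre0 hclosedNew
      refine ⟨FF, ?_, hFlen, hFiff⟩
      simp only [pvBFSA]
      rw [h]
      exact hF

-- ===== VERDICT (by name: the statement is the Claim_ definition above) =====
theorem get_non_zero_indices_of_L_spec : Claim_equal_get_non_zero_indices_of_L := by
  intro LU row n _ hPre
  unfold Spec_get_non_zero_indices_of_L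
  by_cases h0 : n ≤ 0 ∨ row.length = 0
  · unfold get_non_zero_indices_of_L get_non_zero_indices_of_L_alt
    rw [if_pos h0, if_pos h0]
  · rw [not_or] at h0
    obtain ⟨hn0', hrow⟩ := h0
    rcases hPre with h | h | ⟨hnn, hLUlen, hrows⟩
    · omega
    · exact absurd (by rw [h]; rfl) hrow
    obtain ⟨N, rfl⟩ : ∃ N : Nat, n = (N : Int) := ⟨n.toNat, by omega⟩
    have hNt : ((N : Int)).toNat = N := by omega
    obtain ⟨F0, c0, first0, last0, q0, hseed, hlen0, hc0, hq0, hmem0⟩ :=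
      pvSeedA_spec N row (List.replicate ((N : Int)).toNat false) 0 (N : Int) 0 [] hnn
        (by simp [hNt])
        (by rw [List.count_eq_zero.mpr (by simp)]; simp)
        (by intro x hx; simp at hx)
        (by
          intro m hm
          rw [List.getD_eq_getElem?_getD, List.getElem?_replicate] at hm
          split_ifs at hm <;> simp_all)
    unfold get_non_zero_indices_of_L get_non_zero_indices_of_L_alt
    have hnone : ¬((N : Int) ≤ 0 ∨ row.length = 0) := by
      rw [not_or]
      exact ⟨by omega, hrow⟩
    rw [if_neg hnone, if_neg hnone, hseed,
      pvSeedB_eq (N : Int) row (List.replicate ((N : Int)).toNat false) 0 (N : Int) 0 [], hseed]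
    dsimp only
    by_cases hc0N : c0 = (N : Int)
    · rw [if_pos hc0N, if_pos hc0N]
    · rw [if_neg hc0N, if_neg hc0N]
      have hcount0 : F0.count true < N := by
        have h1 : F0.count true ≤ N := hlen0 ▸ List.count_le_length
        have h2 : F0.count true ≠ N := by
          intro hh
          exact hc0N (by rw [hc0, hh])
        omega
      obtain ⟨FA, hA, hlenA, hiffA⟩ :=
        pvBFSA_spec LU N F0 last0 first0 hlen0 F0 c0 last0 q0 hlen0 hc0 hcount0
          (pv_lastOf_base N F0 last0).symm hq0 (fun _ h => h) (fun m h => pvReach.base m h)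
          (fun m _ h => Or.inl (hmem0 m h))
      obtain ⟨FB, cB, lB, hB, hlenB, hcB, hlB, hmonoB, hreB, hclB⟩ :=
        pvSweepB_spec LU N F0 last0 N 0 F0 c0 last0 (by omega) (le_refl N) hlen0 hc0
          (pv_lastOf_base N F0 last0).symm (fun _ h => h) (fun m h => pvReach.base m h)
          (fun m _ => Or.inl (by omega))
      rw [hA, hB]
      dsimp only
      have hiffB : ∀ m : Nat, FB.getD m false = true ↔ pvReach LU N F0 m := by
        intro m
        constructor
        · exact hreB m
        · intro h
          exact pv_reach_sub (fun m' h' => hmonoB m' h') hclB h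
      have hFeq : FA = FB := by
        apply List.ext_getElem (by rw [hlenA, hlenB])
        intro k hk1 hk2
        have e1 : FA.getD k false = FA[k] := by
          rw [List.getD_eq_getElem?_getD, List.getElem?_eq_getElem hk1]
          rfl
        have e2 : FB.getD k false = FB[k] := by
          rw [List.getD_eq_getElem?_getD, List.getElem?_eq_getElem hk2]
          rfl
        have hiff := (hiffA k).trans (hiffB k).symm
        rw [e1, e2] at hiff
        cases hFA : FA[k] <;> cases hFB : FB[k] <;> rw [hFA, hFB] at hiff <;> simp_all
      rw [hFeq]
      by_cases hfull : FB.count true = N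
      · rw [if_pos hfull, if_pos (by rw [hcB, hfull])]
      · rw [if_neg hfull, if_neg (by rw [hcB]; intro hh; exact hfull (by exact_mod_cast hh)), hlB]
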